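-- pv_equiv track=rewrite | github.com/Yusuf90/AdventOfCode-Solutions | AoC19_Yusuf/Day4/D4.py | criteria_sixdigit
-- ===== SOURCE A (Python) =====
-- def criteria_sixdigit(i_input):
-- 	_iCount = 0
-- 	while i_input > 0:
-- 		i_input = i_input // 10
-- 		_iCount += 1
-- 	if _iCount == 6:
-- 		return True
-- 	else:
-- 		return False
-- ===== SOURCE B (Python) =====
-- def criteria_sixdigit(i_input):
-- 	return 100000 <= i_input < 1000000
-- ===== Notes on version B (the rewrite author's own statement) =====
-- stated objective: simpler
-- what changed: Replaced the digit-counting division loop with a single closed-form six-digit range comparison.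
import Mathlib
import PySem

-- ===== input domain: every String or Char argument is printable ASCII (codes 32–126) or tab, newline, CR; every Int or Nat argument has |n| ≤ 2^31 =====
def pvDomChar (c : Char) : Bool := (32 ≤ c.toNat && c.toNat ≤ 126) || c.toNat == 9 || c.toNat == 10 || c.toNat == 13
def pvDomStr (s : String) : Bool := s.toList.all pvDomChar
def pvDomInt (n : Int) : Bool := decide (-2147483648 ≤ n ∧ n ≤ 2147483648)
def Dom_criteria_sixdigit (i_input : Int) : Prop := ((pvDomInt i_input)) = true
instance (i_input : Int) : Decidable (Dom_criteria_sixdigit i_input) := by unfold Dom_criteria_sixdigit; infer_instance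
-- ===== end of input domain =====

-- B replaces A's digit-counting division loop with one closed-form range comparison (objective: simpler).

-- ===== PORT A =====
-- the 'while i_input > 0' loop of A, carrying the loop state (i_input, _iCount)
def criteriaLoop (i_input : Int) (iCount : Int) : Int :=
  if 0 < i_input then
    criteriaLoop (PySem.Int.floordiv i_input 10) (iCount + 1)
  else
    iCount
termination_by i_input.toNat
decreasing_by
  have h10 : PySem.Int.floordiv i_input 10 = i_input / 10 :=
    PySem.Int.floordiv_eq_ediv_of_pos (by omega)
  rw [h10]; omega

def criteria_sixdigit (i_input : Int) : Bool :=
  if criteriaLoop i_input 0 = 6 then true else false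

-- ===== PORT B =====
def criteria_sixdigit_alt (i_input : Int) : Bool :=
  decide (100000 ≤ i_input ∧ i_input < 1000000)

-- ===== PRECONDITION & SPEC =====
def Spec_criteria_sixdigit (i_input : Int) (out : Bool) : Prop := out = criteria_sixdigit_alt i_input
instance (i_input : Int) (out : Bool) : Decidable (Spec_criteria_sixdigit i_input out) := by unfold Spec_criteria_sixdigit; infer_instance

-- ===== CLAIM (what is proved, stated in full; the proofs are below) =====
def Claim_equal_criteria_sixdigit : Prop := ∀ (i_input : Int), Dom_criteria_sixdigit i_input → Spec_criteria_sixdigit i_input (criteria_sixdigit i_input)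

-- ===== LEMMAS AND PROOFS =====

-- digit count of a natural number, proof helper mirroring the loop's effect
def ndigits (n : Nat) : Nat :=
  if n = 0 then 0 else ndigits (n / 10) + 1
decreasing_by omega

theorem criteriaLoop_eq_ndigits :
    ∀ (n : Nat) (i c : Int), i.toNat ≤ n → criteriaLoop i c = c + (ndigits i.toNat : Int) := by
  intro n
  induction n with
  | zero =>
    intro i c h
    rw [criteriaLoop]
    have : ¬ 0 < i := by omega
    simp [this, show i.toNat = 0 by omega, ndigits]
  | succ n ih =>
    intro i c h
    rw [criteriaLoop]
    by_cases hp : 0 < i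
    · have h10 : PySem.Int.floordiv i 10 = i / 10 :=
        PySem.Int.floordiv_eq_ediv_of_pos (by omega)
      simp only [hp, if_true, h10]
      have hle : (i / 10).toNat ≤ n := by omega
      rw [ih _ _ hle]
      have htn : (i / 10).toNat = i.toNat / 10 := by omega
      have hnz : i.toNat ≠ 0 := by omega
      rw [htn]
      conv_rhs => rw [ndigits]
      simp [hnz]
      ring
    · simp [hp, show i.toNat = 0 by omega, ndigits]

theorem ndigits_le : ∀ (k m : Nat), m < 10 ^ k → ndigits m ≤ k := by
  intro k
  induction k with
  | zero => intro m h; rw [ndigits]; simp_all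
  | succ k ih =>
    intro m h
    rw [ndigits]
    by_cases hz : m = 0
    · simp [hz]
    · simp only [hz, if_false]
      have : m / 10 < 10 ^ k := by
        have : 10 ^ (k + 1) = 10 ^ k * 10 := by ring
        omega
      have := ih _ this
      omega

theorem lt_ndigits : ∀ (k m : Nat), 10 ^ k ≤ m → k < ndigits m := by
  intro k
  induction k with
  | zero => intro m h; rw [ndigits]; simp at h; simp [show m ≠ 0 by omega]
  | succ k ih =>
    intro m h
    rw [ndigits]
    have hz : m ≠ 0 := by
      have : 0 < 10 ^ (k + 1) := pow_pos (by norm_num) _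
      omega
    simp only [hz, if_false]
    have : 10 ^ k ≤ m / 10 := by
      have : 10 ^ (k + 1) = 10 ^ k * 10 := by ring
      omega
    have := ih _ this
    omega

theorem ndigits_eq_six (m : Nat) : ndigits m = 6 ↔ 100000 ≤ m ∧ m < 1000000 := by
  constructor
  · intro h
    constructor
    · by_contra hlt
      have := ndigits_le 5 m (by norm_num at hlt ⊢; omega)
      omega
    · by_contra hge
      have := lt_ndigits 6 m (by norm_num at hge ⊢; omega)
      omega
  · intro ⟨h1, h2⟩
    have ha := ndigits_le 6 m (by norm_num; omega)
    have hb := lt_ndigits 5 m (by norm_num; omega)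
    omega

-- ===== VERDICT (by name: the statement is the Claim_ definition above) =====
theorem criteria_sixdigit_spec : Claim_equal_criteria_sixdigit := by
  intro i _
  unfold Spec_criteria_sixdigit criteria_sixdigit criteria_sixdigit_alt
  rw [criteriaLoop_eq_ndigits i.toNat i 0 le_rfl]
  simp only [zero_add]
  have key : ndigits i.toNat = 6 ↔ 100000 ≤ i ∧ i < 1000000 := by
    rw [ndigits_eq_six]; omega
  by_cases hp : 100000 ≤ i ∧ i < 1000000
  · have h6 : ndigits i.toNat = 6 := key.mpr hp
    simp [h6, hp.1, hp.2]
  · have h6 : ¬ ((ndigits i.toNat : Int) = 6) := by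
      have : ndigits i.toNat ≠ 6 := fun hh => hp (key.mp hh)
      omega
    simp [h6, hp]
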